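-- pv_equiv track=rewrite | github.com/waelectriz/EE0040-Design-Automation-for-Camouflage-Circuits | Attack/attack_bforce.py | _grid_produce
-- ===== SOURCE A (Python) =====
-- def _grid_produce(user_input_combi, camo_gates_indexes):
--     camo_gate_num = len(camo_gates_indexes)
--     idx = [0] * camo_gate_num
--
--     result = []
--
--     count = 0
--     total = len(user_input_combi) ** camo_gate_num
--     while(count < total):
--         for i in range(camo_gate_num):
--             result.append(user_input_combi[idx[i]])
--         if len(idx) == 0:
--             raise Exception('No camo detected in file!')
--         count += 1
--         idx[-1] += 1
--
--         tmp = len(idx) - 1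
--         while tmp > -1:
--             if idx[tmp] == len(user_input_combi):
--                 idx[tmp] = 0
--                 idx[tmp-1] += 1
--             tmp -= 1
--
--     result_combi = []
--     for i in range(len(result)):
--         if i % camo_gate_num == 0:
--             result_combi.append([])
--         result_combi[-1].append(result[i])
--
--     for i, combi in enumerate(result_combi):
--         result_combi[i] = tuple(combi)
--
--     return result_combi
-- ===== SOURCE B (Python) =====
-- def _grid_produce(user_input_combi, camo_gates_indexes):
--     if len(camo_gates_indexes) == 0:
--         raise Exception('No camo detected in file!')
--     result = [[]]
--     for _ in camo_gates_indexes: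
--         result = [prefix + [v] for prefix in result for v in user_input_combi]
--     return [tuple(x) for x in result]
-- ===== Notes on version B (the rewrite author's own statement) =====
-- stated objective: simpler
-- what changed: Replaces the odometer simulation (a mutable digit counter incremented with a hand-written carry pass per tuple, a flat value list, then a chunk-and-tuple post-pass) by progressive accumulation: start from [[]] and extend every prefix by every value once per camo gate, building the product directly with no counter, no carries and no chunking.
import Mathlib
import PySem

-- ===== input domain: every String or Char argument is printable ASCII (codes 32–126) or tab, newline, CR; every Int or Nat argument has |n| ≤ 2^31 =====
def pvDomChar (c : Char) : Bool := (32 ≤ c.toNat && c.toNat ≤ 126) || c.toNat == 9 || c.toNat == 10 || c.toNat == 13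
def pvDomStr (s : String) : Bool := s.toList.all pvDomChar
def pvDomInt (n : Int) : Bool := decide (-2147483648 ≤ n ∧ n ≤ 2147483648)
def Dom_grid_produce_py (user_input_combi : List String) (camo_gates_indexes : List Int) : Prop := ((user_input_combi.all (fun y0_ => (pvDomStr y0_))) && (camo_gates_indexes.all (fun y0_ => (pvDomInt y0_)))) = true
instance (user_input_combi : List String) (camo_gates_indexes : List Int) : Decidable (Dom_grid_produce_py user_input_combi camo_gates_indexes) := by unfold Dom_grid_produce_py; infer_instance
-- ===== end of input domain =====

-- B builds the Cartesian product by progressive accumulation (extend every pfx by every value,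
-- once per camo gate) instead of A's mutable base-m odometer with a hand-written carry pass and a
-- final chunk-and-tuple post-pass.  Both raise on an empty camo list (excluded by Pre_).

-- ===== PORT A =====
-- idx[i] read (IndexError unreachable inside the loop: digits stay in range)
def pvIGet (idx : List Int) (i : Int) : Int := PySem.List.pyGetD idx i 0

-- the inner 'while tmp > -1' carry scan; fuel t+1 means 'tmp = t' is processed next
def pvCarry (m : Int) (idx : List Int) : Nat → List Int
  | 0 => idx
  | t+1 =>
    let idx' := if pvIGet idx (t : Int) = m then
        let a := PySem.List.pySetD idx (t : Int) 0
        PySem.List.pySetD a ((t : Int) - 1) (pvIGet a ((t : Int) - 1) + 1)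
      else idx
    pvCarry m idx' t

-- the outer 'while count < total' loop; fuel = total - count
def pvLoopA (u : List String) (n : Nat) : Nat → List Int → List String → List String
  | 0, _, result => result
  | f+1, idx, result =>
    let result' := result ++ (List.range n).map (fun (i : Nat) => PySem.List.pyGetD u (pvIGet idx (i : Int)) "")
    if idx.length = 0 then result'   -- Python: raise Exception('No camo detected in file!') (outside Pre_)
    else
      let idx1 := PySem.List.pySetD idx (-1) (pvIGet idx (-1) + 1)
      let idx2 := pvCarry (u.length : Int) idx1 idx1.length
      pvLoopA u n f idx2 result'

-- 'for i in range(len(result)): … result_combi[-1].append(result[i])'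
def pvChunk (n : Nat) (result : List String) : List (List String) :=
  (List.range result.length).foldl (fun acc i =>
    let acc1 := if i % n = 0 then acc ++ [[]] else acc
    acc1.dropLast ++ [(acc1.getLast?.getD []) ++ [PySem.List.pyGetD result (i : Int) ""]]) []

def grid_produce_py (user_input_combi : List String) (camo_gates_indexes : List Int) : List (List String) :=
  let camo_gate_num := camo_gates_indexes.length
  let idx : List Int := List.replicate camo_gate_num 0
  let total := user_input_combi.length ^ camo_gate_num
  let result := pvLoopA user_input_combi camo_gate_num total idx []
  -- 'result_combi[i] = tuple(combi)': tuple() is the identity under the List convention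
  (pvChunk camo_gate_num result).map (fun combi => combi)

-- ===== PORT B =====
def grid_produce_py_alt (user_input_combi : List String) (camo_gates_indexes : List Int) : List (List String) :=
  if camo_gates_indexes.isEmpty then []   -- Python B: raise Exception('No camo detected in file!') (outside Pre_)
  else
    ((camo_gates_indexes.foldl
        (fun result _ => result.flatMap (fun pfx => user_input_combi.map (fun v => pfx ++ [v])))
        [[]]).map (fun x => x))   -- 'tuple(x)' is the identity under the List convention

-- ===== PRECONDITION & SPEC =====
-- Pre_ excludes exactly the inputs with an empty camo list, on which A raises
-- Exception('No camo detected in file!') (B raises the same exception there).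
def Pre_grid_produce_py (user_input_combi : List String) (camo_gates_indexes : List Int) : Prop :=
  camo_gates_indexes ≠ []
instance (user_input_combi : List String) (camo_gates_indexes : List Int) : Decidable (Pre_grid_produce_py user_input_combi camo_gates_indexes) := by unfold Pre_grid_produce_py; infer_instance

def pvWitness_grid_produce_py : List String × List Int := (["0", "1"], [3])

def Spec_grid_produce_py (user_input_combi : List String) (camo_gates_indexes : List Int) (out : List (List String)) : Prop := out = grid_produce_py_alt user_input_combi camo_gates_indexes
instance (user_input_combi : List String) (camo_gates_indexes : List Int) (out : List (List String)) : Decidable (Spec_grid_produce_py user_input_combi camo_gates_indexes out) := by unfold Spec_grid_produce_py; infer_instance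

-- ===== CLAIM (what is proved, stated in full; the proofs are below) =====
def Claim_equal_grid_produce_py : Prop := ∀ (user_input_combi : List String) (camo_gates_indexes : List Int), Dom_grid_produce_py user_input_combi camo_gates_indexes → Pre_grid_produce_py user_input_combi camo_gates_indexes → Spec_grid_produce_py user_input_combi camo_gates_indexes (grid_produce_py user_input_combi camo_gates_indexes)

-- ===== LEMMAS AND PROOFS =====

-- ---- proof-side model: LSB-first digit lists ----

-- successor of an LSB-first base-m digit list (odometer increment)
def pvSuccL (m : Int) : List Int → List Int
  | [] => []
  | d :: ds => if d + 1 = m then 0 :: pvSuccL m ds else (d + 1) :: ds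

-- value of an LSB-first digit list
def pvVal (m : Int) : List Int → Int
  | [] => 0
  | d :: ds => d + m * pvVal m ds

def pvDigitsOK (m : Int) (r : List Int) : Prop := ∀ e ∈ r, 0 ≤ e ∧ e < m

-- the tuple A emits for (MSB-first) idx = r.reverse
def pvTup (u : List String) (r : List Int) : List String :=
  r.reverse.map (fun d => PySem.List.pyGetD u d "")

-- enumerate f successive tuples starting from LSB-first state r
def pvEnum (u : List String) : Nat → List Int → List (List String)
  | 0, _ => []
  | f+1, r => pvTup u r :: pvEnum u f (pvSuccL (u.length : Int) r)

-- B's accumulated product after n rounds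
def pvE (u : List String) : Nat → List (List String)
  | 0 => [[]]
  | n+1 => (pvE u n).flatMap (fun p => u.map (fun v => p ++ [v]))

-- the carry scan never fires at position 0 (no wrap-around to idx[-1])
def pvWrapFree (m : Int) (idx : List Int) : Nat → Prop
  | 0 => True
  | t+1 =>
    if pvIGet idx (t : Int) = m then
      t ≠ 0 ∧ pvWrapFree m (PySem.List.pySetD (PySem.List.pySetD idx (t : Int) 0) ((t : Int) - 1)
        (pvIGet (PySem.List.pySetD idx (t : Int) 0) ((t : Int) - 1) + 1)) t
    else pvWrapFree m idx t

-- one step of A's chunking fold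
def pvCStep (n : Nat) (acc : List (List String)) (i : Nat) (s : String) : List (List String) :=
  let acc1 := if i % n = 0 then acc ++ [[]] else acc
  acc1.dropLast ++ [(acc1.getLast?.getD []) ++ [s]]

theorem pvIGet_append_lt (g : List Int) (y : Int) (t : Nat) (h : t < g.length) :
    pvIGet (g ++ [y]) (t : Int) = pvIGet g (t : Int) := by
  simp [pvIGet, List.getD, List.getElem?_append_left h]

theorem pvIGet_append_len (g : List Int) (y : Int) :
    pvIGet (g ++ [y]) (g.length : Int) = y := by
  simp [pvIGet, List.getD]

theorem pvSetD_append_lt (g : List Int) (y v : Int) (t : Nat) (h : t < g.length) :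
    PySem.List.pySetD (g ++ [y]) (t : Int) v = PySem.List.pySetD g (t : Int) v ++ [y] := by
  simp [List.set_append, if_pos h]

theorem pvIGet_neg_one (g : List Int) (d : Int) : pvIGet (g ++ [d]) (-1) = d := by
  simp [pvIGet]

theorem pvSetD_neg_one (g : List Int) (d v : Int) :
    PySem.List.pySetD (g ++ [d]) (-1) v = g ++ [v] := by
  simp [PySem.List.pySetD, PySem.List.pySet?, PySem.List.pyIdx?]

theorem pvCarry_noop (m : Int) (f : Nat) : ∀ (idx : List Int),
    (∀ t, t < f → pvIGet idx (t : Int) ≠ m) → pvCarry m idx f = idx := by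
  induction f with
  | zero => intro idx _; rfl
  | succ t ih =>
    intro idx h
    simp only [pvCarry, if_neg (h t (Nat.lt_succ_self t))]
    exact ih idx (fun s hs => h s (Nat.lt_succ_of_lt hs))

theorem pvWrapFree_noop (m : Int) (f : Nat) : ∀ (idx : List Int),
    (∀ t, t < f → pvIGet idx (t : Int) ≠ m) → pvWrapFree m idx f := by
  induction f with
  | zero => intro idx _; trivial
  | succ t ih =>
    intro idx h
    simp only [pvWrapFree, if_neg (h t (Nat.lt_succ_self t))]
    exact ih idx (fun s hs => h s (Nat.lt_succ_of_lt hs))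

theorem pvCarry_append (m : Int) (f : Nat) : ∀ (g : List Int) (y : Int), f ≤ g.length →
    pvWrapFree m g f →
    pvCarry m (g ++ [y]) f = pvCarry m g f ++ [y] ∧ pvWrapFree m (g ++ [y]) f := by
  induction f with
  | zero => intro g y _ _; exact ⟨rfl, trivial⟩
  | succ t ih =>
    intro g y hle hwf
    have ht : t < g.length := hle
    have hg : pvIGet (g ++ [y]) (t : Int) = pvIGet g (t : Int) := pvIGet_append_lt g y t ht
    by_cases hc : pvIGet g (t : Int) = m
    · -- fires
      have hwf' := hwf
      simp only [pvWrapFree, if_pos hc] at hwf'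
      obtain ⟨ht0, hwfrec⟩ := hwf'
      obtain ⟨t', rfl⟩ : ∃ t', t = t' + 1 := ⟨t - 1, by omega⟩
      have hsub : ((t' + 1 : Nat) : Int) - 1 = ((t' : Nat) : Int) := by push_cast; ring
      have ht' : t' < g.length := by omega
      -- the fired state on g, and on g ++ [y]
      set a := PySem.List.pySetD g ((t' + 1 : Nat) : Int) 0 with ha
      have haln : a.length = g.length := by simp [ha]
      have hfire : PySem.List.pySetD (g ++ [y]) ((t' + 1 : Nat) : Int) 0 = a ++ [y] :=
        pvSetD_append_lt g y 0 (t' + 1) ht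
      have hgeta : pvIGet (a ++ [y]) (((t' + 1 : Nat) : Int) - 1) = pvIGet a (((t' + 1 : Nat) : Int) - 1) := by
        rw [hsub]; exact pvIGet_append_lt a y t' (by omega)
      have hseta : PySem.List.pySetD (a ++ [y]) (((t' + 1 : Nat) : Int) - 1) (pvIGet a (((t' + 1 : Nat) : Int) - 1) + 1)
          = PySem.List.pySetD a (((t' + 1 : Nat) : Int) - 1) (pvIGet a (((t' + 1 : Nat) : Int) - 1) + 1) ++ [y] := by
        rw [hsub]; exact pvSetD_append_lt a _ _ t' (by omega)
      set b := PySem.List.pySetD a (((t' + 1 : Nat) : Int) - 1) (pvIGet a (((t' + 1 : Nat) : Int) - 1) + 1) with hb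
      have hbln : b.length = g.length := by simp [hb, haln]
      have hrec := ih b y (by omega) hwfrec
      constructor
      · simp only [pvCarry, if_pos hc, if_pos (hg.trans hc)]
        rw [hfire, hgeta, hseta]
        exact hrec.1
      · simp only [pvWrapFree, if_pos (hg.trans hc)]
        refine ⟨ht0, ?_⟩
        rw [hfire, hgeta, hseta]
        exact hrec.2
    · have hwf' := hwf
      simp only [pvWrapFree, if_neg hc] at hwf'
      have hrec := ih g y (by omega) hwf'
      constructor
      · simp only [pvCarry, if_neg hc, if_neg (hg.symm ▸ hc : ¬ pvIGet (g ++ [y]) (t:Int) = m)]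
        exact hrec.1
      · simp only [pvWrapFree, if_neg (hg.symm ▸ hc : ¬ pvIGet (g ++ [y]) (t:Int) = m)]
        exact hrec.2

theorem pvSetD_append_len (g : List Int) (y v : Int) :
    PySem.List.pySetD (g ++ [y]) ((g.length : Nat) : Int) v = g ++ [v] := by
  simp [List.set_append]

theorem pvIGet_append_pred (g : List Int) (y : Int) (hg : g ≠ []) :
    pvIGet (g ++ [y]) (((g.length : Nat) : Int) - 1) = pvIGet g (-1) := by
  obtain ⟨g', e, rfl⟩ := (List.eq_nil_or_concat g).resolve_left hg
  rw [List.concat_eq_append]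
  have h1 : (((g' ++ [e]).length : Nat) : Int) - 1 = ((g'.length : Nat) : Int) := by simp
  rw [h1, pvIGet_append_lt (g' ++ [e]) y g'.length (by simp), pvIGet_append_len, pvIGet_neg_one]

theorem pvSetD_append_pred (g : List Int) (y v : Int) (hg : g ≠ []) :
    PySem.List.pySetD (g ++ [y]) (((g.length : Nat) : Int) - 1) v
      = PySem.List.pySetD g (-1) v ++ [y] := by
  obtain ⟨g', e, rfl⟩ := (List.eq_nil_or_concat g).resolve_left hg
  rw [List.concat_eq_append]
  have h1 : (((g' ++ [e]).length : Nat) : Int) - 1 = ((g'.length : Nat) : Int) := by simp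
  rw [h1, pvSetD_append_lt (g' ++ [e]) y v g'.length (by simp), pvSetD_append_len, pvSetD_neg_one]

theorem pvStep_eq (m : Int) (xs : List Int) : xs ≠ [] →
    pvDigitsOK m xs → xs ≠ List.replicate xs.length (m - 1) →
    pvCarry m (PySem.List.pySetD xs (-1) (pvIGet xs (-1) + 1)) xs.length
      = (pvSuccL m xs.reverse).reverse
    ∧ pvWrapFree m (PySem.List.pySetD xs (-1) (pvIGet xs (-1) + 1)) xs.length := by
  induction xs using List.reverseRecOn with
  | nil => intro h; exact absurd rfl h
  | append_singleton g d ih =>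
    intro _ hok hnr
    have hinc : PySem.List.pySetD (g ++ [d]) (-1) (pvIGet (g ++ [d]) (-1) + 1) = g ++ [d + 1] := by
      rw [pvIGet_neg_one, pvSetD_neg_one]
    rw [hinc]
    have hlen : (g ++ [d]).length = g.length + 1 := by simp
    rw [hlen]
    have hget : pvIGet (g ++ [d + 1]) ((g.length : Nat) : Int) = d + 1 := pvIGet_append_len g (d + 1)
    have hdok : 0 ≤ d ∧ d < m := hok d (by simp)
    have hrev : (g ++ [d]).reverse = d :: g.reverse := by simp
    by_cases hfire : d + 1 = m
    · -- the last digit overflows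
      have hd : d = m - 1 := by omega
      have hgne : g ≠ [] := by
        rintro rfl
        exact hnr (by simp [hd])
      have hgok : pvDigitsOK m g := fun e he => hok e (List.mem_append_left _ he)
      have hgnr : g ≠ List.replicate g.length (m - 1) := by
        intro hrep
        apply hnr
        rw [hlen, List.replicate_succ', ← hrep, hd]
      obtain ⟨hcarr, hwf⟩ := ih hgne hgok hgnr
      set inc := PySem.List.pySetD g (-1) (pvIGet g (-1) + 1) with hincdef
      have hinclen : inc.length = g.length := by
        simp [hincdef, PySem.List.length_pySetD]
      have hstep1 : pvCarry m (g ++ [d + 1]) (g.length + 1)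
          = pvCarry m (inc ++ [0]) g.length := by
        simp only [pvCarry, hget, if_pos hfire]
        rw [pvSetD_append_len, pvIGet_append_pred g 0 hgne, pvSetD_append_pred g 0 _ hgne]
      obtain ⟨happ, hwfapp⟩ := pvCarry_append m g.length inc 0 (by omega) hwf
      refine ⟨?_, ?_⟩
      · rw [hstep1, happ, hcarr, hrev]
        simp [pvSuccL, if_pos hfire]
      · simp only [pvWrapFree, hget, if_pos hfire]
        refine ⟨by simpa using hgne, ?_⟩
        rw [pvSetD_append_len, pvIGet_append_pred g 0 hgne, pvSetD_append_pred g 0 _ hgne]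
        exact hwfapp
    · -- no carry at all
      have hcar : pvCarry m (g ++ [d + 1]) (g.length + 1) = g ++ [d + 1] := by
        have h0 : pvCarry m (g ++ [d + 1]) (g.length + 1)
            = pvCarry m (g ++ [d + 1]) g.length := by
          simp only [pvCarry, hget, if_neg hfire]
        rw [h0]
        apply pvCarry_noop
        intro t ht
        rw [pvIGet_append_lt g (d+1) t ht]
        have : pvIGet g (t : Int) < m := by
          have hmem : pvIGet g (t : Int) ∈ g := by
            simp [pvIGet, List.getD, List.getElem?_eq_getElem ht, List.getElem_mem]
          exact (hok _ (List.mem_append_left _ hmem)).2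
        omega
      refine ⟨?_, ?_⟩
      · rw [hcar, hrev]
        simp [pvSuccL, if_neg hfire]
      · have h0 : pvWrapFree m (g ++ [d + 1]) (g.length + 1) := by
          simp only [pvWrapFree, hget, if_neg hfire]
          apply pvWrapFree_noop
          intro t ht
          rw [pvIGet_append_lt g (d+1) t ht]
          have hmem : pvIGet g (t : Int) ∈ g := by
            simp [pvIGet, List.getD, List.getElem?_eq_getElem ht, List.getElem_mem]
          have := (hok _ (List.mem_append_left _ hmem)).2
          omega
        exact h0

theorem pvSuccL_length (m : Int) (r : List Int) : (pvSuccL m r).length = r.length := by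
  induction r with
  | nil => rfl
  | cons d ds ih => simp only [pvSuccL]; split <;> simp [ih]

theorem pvSuccL_ok (m : Int) (r : List Int) (hm : 1 ≤ m) (h : pvDigitsOK m r) :
    pvDigitsOK m (pvSuccL m r) := by
  induction r with
  | nil => exact h
  | cons d ds ih =>
    have hd := h d (by simp)
    have hds : pvDigitsOK m ds := fun e he => h e (by simp [he])
    simp only [pvSuccL]
    split
    · intro e he
      rcases List.mem_cons.1 he with rfl | he'
      · omega
      · exact ih hds e he'
    · intro e he
      rcases List.mem_cons.1 he with rfl | he'
      · omega
      · exact hds e he'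

theorem pvVal_succL (m : Int) (r : List Int) (hok : pvDigitsOK m r)
    (hnr : r ≠ List.replicate r.length (m - 1)) :
    pvVal m (pvSuccL m r) = pvVal m r + 1 := by
  induction r with
  | nil => exact absurd rfl hnr
  | cons d ds ih =>
    have hd := hok d (by simp)
    have hds : pvDigitsOK m ds := fun e he => hok e (by simp [he])
    simp only [pvSuccL]
    split
    · rename_i hfire
      have hdm : d = m - 1 := by omega
      have hdsnr : ds ≠ List.replicate ds.length (m - 1) := by
        intro hrep
        exact hnr (by simp [List.replicate_succ, hdm, ← hrep])
      rw [pvVal, pvVal, ih hds hdsnr, hdm]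
      ring
    · rw [pvVal, pvVal]; ring

theorem pvVal_replicate (m : Int) (n : Nat) :
    pvVal m (List.replicate n (m - 1)) = m ^ n - 1 := by
  induction n with
  | zero => simp [pvVal]
  | succ k ih => rw [List.replicate_succ, pvVal, ih]; ring

theorem pvVal_zeros (m : Int) (n : Nat) : pvVal m (List.replicate n 0) = 0 := by
  induction n with
  | zero => rfl
  | succ k ih => rw [List.replicate_succ, pvVal, ih]; ring

theorem pvMapRange_iget (idx : List Int) (f : Int → String) :
    (List.range idx.length).map (fun (i : Nat) => f (pvIGet idx (i : Int))) = idx.map f := by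
  apply List.ext_getElem
  · simp
  · intro k h1 h2
    simp only [List.length_map, List.length_range] at h1
    simp only [List.length_map] at h2
    simp only [List.getElem_map, List.getElem_range]
    congr 1
    simp [pvIGet, List.getD, List.getElem?_eq_getElem h2]

theorem pvTup_cons (u : List String) (j : Int) (r : List Int) :
    pvTup u (j :: r) = pvTup u r ++ [PySem.List.pyGetD u j ""] := by
  simp [pvTup]

theorem pvEnum_block (u : List String) (f : Nat) : ∀ (c j : Nat) (r : List Int),
    j + (c + 1) = u.length →
    pvEnum u ((c + 1) + f * u.length) ((j : Int) :: r)
      = (List.range' j (c + 1)).map (fun (jj : Nat) => pvTup u r ++ [PySem.List.pyGetD u (jj : Int) ""])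
        ++ pvEnum u (f * u.length) ((0 : Int) :: pvSuccL (u.length : Int) r) := by
  intro c
  induction c with
  | zero =>
    intro j r hj
    have hfire : (j : Int) + 1 = (u.length : Int) := by omega
    have h1 : 0 + 1 + f * u.length = (f * u.length) + 1 := by omega
    rw [h1, pvEnum]
    have h2 : pvSuccL (u.length : Int) ((j : Int) :: r) = (0 : Int) :: pvSuccL (u.length : Int) r := by
      simp only [pvSuccL, if_pos hfire]
    rw [h2, pvTup_cons, List.range'_one, List.map_cons, List.map_nil]
    rfl
  | succ c ih =>
    intro j r hj
    have hnof : ¬ ((j : Int) + 1 = (u.length : Int)) := by omega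
    have hstep : pvSuccL (u.length : Int) ((j : Int) :: r) = (((j + 1 : Nat) : Int)) :: r := by
      simp only [pvSuccL, if_neg hnof, Nat.cast_add, Nat.cast_one]
    have : (c + 1 + 1) + f * u.length = ((c + 1) + f * u.length) + 1 := by omega
    rw [this, pvEnum, hstep, ih (j + 1) r (by omega), pvTup_cons]
    rw [List.range'_succ, List.map_cons]
    rfl

theorem pvEnum_blocks (u : List String) (hu : u ≠ []) (f : Nat) : ∀ (r : List Int),
    pvEnum u (f * u.length) ((0 : Int) :: r)
      = (pvEnum u f r).flatMap (fun t => u.map (fun v => t ++ [v])) := by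
  induction f with
  | zero => intro r; rw [Nat.zero_mul]; rfl
  | succ f ih =>
    intro r
    have hlen : 0 < u.length := List.length_pos_of_ne_nil hu
    obtain ⟨c, hc⟩ : ∃ c, u.length = c + 1 := ⟨u.length - 1, by omega⟩
    have h1 : (f + 1) * u.length = (c + 1) + f * u.length := by rw [hc]; ring
    have hb := pvEnum_block u f c 0 r (by omega)
    norm_num at hb
    rw [h1, hb]
    have h2 : List.range' 0 (c + 1) = List.range u.length := by
      rw [hc, List.range_eq_range']
    have h3 : (List.range u.length).map (fun (jj : Nat) => pvTup u r ++ [PySem.List.pyGetD u (jj : Int) ""])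
        = u.map (fun v => pvTup u r ++ [v]) := by
      apply List.ext_getElem
      · simp
      · intro k hk1 hk2
        simp only [List.length_map, List.length_range] at hk1
        simp only [List.getElem_map, List.getElem_range]
        simp [List.getD, List.getElem?_eq_getElem hk1]
    norm_num at h3
    rw [h2, h3, pvEnum, List.flatMap_cons, ih]

theorem pvEnum_eq_E (u : List String) (hu : u ≠ []) (n : Nat) :
    pvEnum u (u.length ^ n) (List.replicate n 0) = pvE u n := by
  induction n with
  | zero => rfl
  | succ n ih =>
    have h1 : u.length ^ (n + 1) = (u.length ^ n) * u.length := pow_succ _ _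
    rw [h1, List.replicate_succ, pvEnum_blocks u hu, ih]
    rfl

theorem pvE_lengths (u : List String) (n : Nat) : ∀ t ∈ pvE u n, t.length = n := by
  induction n with
  | zero => intro t ht; simp [pvE] at ht; simp [ht]
  | succ n ih =>
    intro t ht
    simp only [pvE, List.mem_flatMap] at ht
    obtain ⟨p, hp, ht⟩ := ht
    simp only [List.mem_map] at ht
    obtain ⟨v, _, rfl⟩ := ht
    simp [ih p hp]

theorem pvE_nil (n : Nat) (hn : n ≠ 0) : pvE ([] : List String) n = [] := by
  cases n with
  | zero => exact absurd rfl hn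
  | succ k => simp [pvE]

theorem pvFoldl_E (u : List String) (l : List Int) :
    l.foldl (fun result _ => result.flatMap (fun pfx => u.map (fun v => pfx ++ [v]))) [[]]
      = pvE u l.length := by
  suffices h : ∀ (l' : List Int) (k : Nat),
      l'.foldl (fun result _ => result.flatMap (fun pfx => u.map (fun v => pfx ++ [v]))) (pvE u k)
        = pvE u (k + l'.length) by
    simpa using h l 0
  intro l'
  induction l' with
  | nil => intro k; simp
  | cons x xs ih =>
    intro k
    rw [List.foldl_cons]
    have h1 : (pvE u k).flatMap (fun pfx => u.map (fun v => pfx ++ [v])) = pvE u (k + 1) := rfl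
    rw [h1, ih (k + 1)]
    congr 1
    simp
    omega

theorem pvFold_range_getD (n : Nat) (xs : List String) :
    ∀ (pre : List String) (acc : List (List String)), pre ++ xs = pre ++ xs →
    (List.range' pre.length xs.length).foldl
        (fun a i => pvCStep n a i (PySem.List.pyGetD (pre ++ xs) (i : Int) "")) acc
      = (xs.zipIdx pre.length).foldl (fun a p => pvCStep n a p.2 p.1) acc := by
  induction xs with
  | nil => intro pre acc _; rfl
  | cons x xs ih =>
    intro pre acc _
    simp only [List.length_cons]
    rw [List.range'_succ, List.foldl_cons]
    have hget : PySem.List.pyGetD (pre ++ x :: xs) (pre.length : Int) "" = x := by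
      simp [List.getD]
    rw [hget]
    have hpre : pre ++ x :: xs = (pre ++ [x]) ++ xs := by simp
    have hlen : pre.length + 1 = (pre ++ [x]).length := by simp
    rw [hpre, hlen, ih (pre ++ [x]) _ rfl]
    have : (x :: xs).zipIdx pre.length = (x, pre.length) :: xs.zipIdx (pre.length + 1) := by
      simp [List.zipIdx_cons]
    rw [this, List.foldl_cons, hlen]

theorem pvChunk_inner (n : Nat) :
    ∀ (p : List String) (c j : Nat) (acc : List (List String)) (cur : List String),
    j + p.length = n → 1 ≤ j →
    (p.zipIdx (c * n + j)).foldl (fun a q => pvCStep n a q.2 q.1) (acc ++ [cur])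
      = acc ++ [cur ++ p] := by
  intro p
  induction p with
  | nil => intro c j acc cur _ _; simp
  | cons x xs ih =>
    intro c j acc cur hj h1
    simp only [List.length_cons] at hj
    have hjn : j < n := by omega
    have hmod : (c * n + j) % n = j := by
      rw [Nat.add_comm, Nat.add_mul_mod_self_right, Nat.mod_eq_of_lt hjn]
    rw [List.zipIdx_cons, List.foldl_cons]
    have hj0 : ¬ j = 0 := by omega
    have hstep : pvCStep n (acc ++ [cur]) (c * n + j) x = acc ++ [cur ++ [x]] := by
      simp [pvCStep, hmod, hj0]
    rw [hstep]
    have hidx : c * n + j + 1 = c * n + (j + 1) := by omega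
    rw [hidx, ih c (j + 1) acc (cur ++ [x]) (by omega) (by omega)]
    simp

theorem pvChunk_outer (n : Nat) (hn : 0 < n) :
    ∀ (ts : List (List String)) (c : Nat) (acc : List (List String)),
    (∀ t ∈ ts, t.length = n) →
    (ts.flatten.zipIdx (c * n)).foldl (fun a q => pvCStep n a q.2 q.1) acc = acc ++ ts := by
  intro ts
  induction ts with
  | nil => intro c acc _; simp
  | cons t ts ih =>
    intro c acc hlen
    have htn : t.length = n := hlen t (by simp)
    obtain ⟨x, t', rfl⟩ : ∃ x t', t = x :: t' := by
      cases t with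
      | nil => simp at htn; omega
      | cons a b => exact ⟨a, b, rfl⟩
    rw [List.flatten_cons, List.zipIdx_append, List.foldl_append]
    have hmod : (c * n) % n = 0 := by
      simp [Nat.mul_mod_left]
    have hfirst : (( x :: t').zipIdx (c * n)).foldl (fun a q => pvCStep n a q.2 q.1) acc
        = acc ++ [x :: t'] := by
      rw [List.zipIdx_cons, List.foldl_cons]
      have hstep : pvCStep n acc (c * n) x = acc ++ [[x]] := by
        simp [pvCStep, hmod]
      rw [hstep]
      have h1 : c * n + 1 = c * n + 1 := rfl
      have := pvChunk_inner n t' c 1 acc [x] (by simp at htn ⊢; omega) (by omega)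
      simpa using this
    rw [hfirst]
    have hoff : c * n + (x :: t').length = (c + 1) * n := by
      rw [htn]; ring
    rw [hoff, ih (c + 1) (acc ++ [x :: t']) (fun s hs => hlen s (by simp [hs]))]
    simp

theorem pvChunk_flatten (n : Nat) (hn : 0 < n) (ts : List (List String))
    (hlen : ∀ t ∈ ts, t.length = n) : pvChunk n ts.flatten = ts := by
  unfold pvChunk
  have hconv := pvFold_range_getD n ts.flatten [] [] rfl
  simp only [List.nil_append, List.length_nil] at hconv
  have h0 : List.range ts.flatten.length = List.range' 0 ts.flatten.length := List.range_eq_range'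
  rw [h0]
  have := pvChunk_outer n hn ts 0 [] hlen
  simp only [Nat.zero_mul] at this
  rw [show (fun (acc : List (List String)) (i : Nat) =>
      (if i % n = 0 then acc ++ [[]] else acc).dropLast ++
        [((if i % n = 0 then acc ++ [[]] else acc).getLast?.getD []) ++ [PySem.List.pyGetD ts.flatten (i : Int) ""]])
    = (fun a i => pvCStep n a i (PySem.List.pyGetD ts.flatten (i : Int) "")) from rfl]
  rw [hconv, this]
  simp

theorem pvLoopA_eq (u : List String) (f : Nat) : ∀ (r : List Int) (result : List String),
    r ≠ [] → pvDigitsOK (u.length : Int) r →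
    pvVal (u.length : Int) r + (f : Int) ≤ (u.length : Int) ^ r.length →
    pvLoopA u r.length f r.reverse result = result ++ (pvEnum u f r).flatten := by
  induction f with
  | zero => intro r result _ _ _; simp [pvLoopA, pvEnum]
  | succ f ih =>
    intro r result hne hok hval
    have hm1 : 1 ≤ (u.length : Int) := by
      obtain ⟨e, he⟩ := List.exists_mem_of_ne_nil r hne
      have := hok e he
      omega
    have hrevne : r.reverse ≠ [] := by simpa using hne
    have hrevlen : r.reverse.length = r.length := List.length_reverse
    have hblock : (List.range r.length).map
        (fun (i : Nat) => PySem.List.pyGetD u (pvIGet r.reverse (i : Int)) "") = pvTup u r := by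
      have := pvMapRange_iget r.reverse (fun d => PySem.List.pyGetD u d "")
      rw [hrevlen] at this
      exact this
    rw [pvLoopA]
    have hlz : ¬ r.reverse.length = 0 := by
      rw [hrevlen]
      intro h
      exact hne (List.eq_nil_of_length_eq_zero h)
    simp only [if_neg hlz]
    rw [hblock]
    cases f with
    | zero =>
      simp [pvLoopA, pvEnum, pvTup]
    | succ f' =>
      -- at least two iterations remain: the current state is not the all-(m-1) odometer
      have hnr : r ≠ List.replicate r.length ((u.length : Int) - 1) := by
        intro hrep
        have hv : pvVal (u.length : Int) r = (u.length : Int) ^ r.length - 1 := by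
          rw [hrep, pvVal_replicate]
          simp
        omega
      have hnrrev : r.reverse ≠ List.replicate r.reverse.length ((u.length : Int) - 1) := by
        rw [hrevlen]
        intro h
        apply hnr
        have := congrArg List.reverse h
        simpa [List.reverse_replicate] using this
      obtain ⟨hstep, _⟩ := pvStep_eq (u.length : Int) r.reverse hrevne
        (fun e he => hok e (List.mem_reverse.1 he)) hnrrev
      rw [List.reverse_reverse] at hstep
      have hlen1 : (PySem.List.pySetD r.reverse (-1) (pvIGet r.reverse (-1) + 1)).length = r.length := by
        rw [PySem.List.length_pySetD, hrevlen]
      rw [hrevlen] at hstep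
      rw [hlen1, hstep]
      have hrec := ih (pvSuccL (u.length : Int) r) (result ++ pvTup u r)
      rw [pvSuccL_length] at hrec
      have hsucc_ok : pvDigitsOK (u.length : Int) (pvSuccL (u.length : Int) r) :=
        pvSuccL_ok _ _ hm1 hok
      have hsucc_val : pvVal (u.length : Int) (pvSuccL (u.length : Int) r) + ((f' + 1 : Nat) : Int)
          ≤ (u.length : Int) ^ r.length := by
        rw [pvVal_succL _ _ hok hnr]
        push_cast at hval ⊢
        omega
      have hsucc_ne : pvSuccL (u.length : Int) r ≠ [] := by
        intro h
        have := pvSuccL_length (u.length : Int) r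
        rw [h] at this
        exact hne (List.eq_nil_of_length_eq_zero this.symm)
      have hloop := hrec hsucc_ne hsucc_ok hsucc_val
      have hE : pvEnum u (f' + 1 + 1) r
          = pvTup u r :: pvEnum u (f' + 1) (pvSuccL ((u.length : Nat) : Int) r) := rfl
      rw [hloop, hE, List.flatten_cons, List.append_assoc]

-- ===== VERDICT (by name: the statement is the Claim_ definition above) =====
theorem grid_produce_py_spec : Claim_equal_grid_produce_py := by
  intro u camo _ hpre
  unfold Spec_grid_produce_py grid_produce_py grid_produce_py_alt
  have hpre' : camo ≠ [] := hpre
  have hemp : camo.isEmpty = false := by simpa [List.isEmpty_iff] using hpre'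
  rw [hemp]
  simp only [Bool.false_eq_true, if_false, pvFoldl_E, List.map_id']
  set n := camo.length with hn
  have hn0 : n ≠ 0 := by
    simpa [hn] using fun h => hpre' (List.eq_nil_of_length_eq_zero h)
  have hrev : (List.replicate n (0 : Int)).reverse = List.replicate n (0 : Int) :=
    List.reverse_replicate
  by_cases hu : u = []
  · subst hu
    have htot : ([] : List String).length ^ n = 0 := by
      simp [Nat.zero_pow (by omega : 0 < n)]
    rw [htot, pvE_nil n hn0]
    rfl
  · have hm1 : 1 ≤ (u.length : Int) := by
      have := List.length_pos_of_ne_nil hu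
      omega
    have hok : pvDigitsOK (u.length : Int) (List.replicate n (0 : Int)) := by
      intro e he
      rw [List.eq_of_mem_replicate he]
      omega
    have hval : pvVal (u.length : Int) (List.replicate n (0 : Int)) + ((u.length ^ n : Nat) : Int)
        ≤ (u.length : Int) ^ (List.replicate n (0 : Int)).length := by
      rw [pvVal_zeros, List.length_replicate]
      push_cast
      omega
    have hne : List.replicate n (0 : Int) ≠ [] := by
      intro h
      exact hn0 (by simpa using congrArg List.length h)
    have hL := pvLoopA_eq u (u.length ^ n) (List.replicate n (0 : Int)) [] hne hok hval
    rw [List.length_replicate, hrev] at hL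
    rw [hL, List.nil_append, pvEnum_eq_E u hu n]
    rw [pvChunk_flatten n (by omega) (pvE u n) (pvE_lengths u n)]
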